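-- pv_equiv track=rewrite | github.com/NithyaKrishnan08/LeetCode-HackerRank | Tries/WordSearchII.py | findWords2
-- ===== SOURCE A (Python) =====
-- from typing import List
--
-- class TrieNode:
--   def __init__(self):
--     self.children = {}
--     self.is_end = False
--
--   def addWord(self, word):
--     node = self
--     for ch in word:
--       if ch not in node.children:
--         node.children[ch] = TrieNode()
--       node = node.children[ch]
--     node.is_end = True
--
-- def findWords2(board: List[List[str]], words: List[str]) -> List[str]:
--   root = TrieNode()
--   for w in words:
--     root.addWord(w)
--
--   no_of_rows, no_of_columns = len(board), len(board[0])
--   result, visit = set(), set()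
--
--   def backtrack(row, column, node, word):
--     if (row < 0 or column < 0 or row == no_of_rows or column == no_of_columns or board[row][column] not in node.children or (row, column) in visit):
--       return
--
--     visit.add((row, column))
--     node = node.children[board[row][column]]
--     word += board[row][column]
--     if node.is_end:
--       result.add(word)
--
--     backtrack(row + 1, column, node, word)
--     backtrack(row - 1, column, node, word)
--     backtrack(row, column + 1, node, word)
--     backtrack(row, column - 1, node, word)
--
--     visit.remove((row, column))
--
--   for row in range(no_of_rows):
--     for column in range(no_of_columns):
--       backtrack(row, column, root, "")
--
--   return list(result)
-- ===== SOURCE B (Python) =====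
-- def findWords2(board, words):
--   # Flat prefix index instead of a linked Trie: one dict mapping each proper
--   # prefix of a word to the set of characters that can extend it, plus the set
--   # of full words; the DFS is purely functional (visited/result passed along).
--   word_set = set(words)
--   nexts = {}  # prefix -> set of single-char strings that extend it
--   for w in words:
--     for i, ch in enumerate(w):
--       nexts.setdefault(w[:i], set()).add(ch)
--
--   rows, cols = len(board), len(board[0])
--
--   def dfs(r, c, path, visited, acc):
--     if r < 0 or c < 0 or r == rows or c == cols:
--       return acc
--     cell = board[r][c]
--     if cell not in nexts.get(path, set()) or (r, c) in visited:
--       return acc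
--     path = path + cell
--     if path in word_set:
--       acc = acc | {path}
--     visited = visited | {(r, c)}
--     for dr, dc in ((1, 0), (-1, 0), (0, 1), (0, -1)):
--       acc = dfs(r + dr, c + dc, path, visited, acc)
--     return acc
--
--   acc = set()
--   for r in range(rows):
--     for c in range(cols):
--       acc = dfs(r, c, "", frozenset(), acc)
--   return list(acc)
-- ===== Notes on version B (the rewrite author's own statement) =====
-- stated objective: alternative
-- what changed: Replaces the linked TrieNode class with a flat dict mapping each word prefix to the set of characters that can extend it (plus a plain word set), and makes the DFS purely functional: the visited set and the result accumulator are passed as values instead of being mutated and rolled back.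
import Mathlib
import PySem

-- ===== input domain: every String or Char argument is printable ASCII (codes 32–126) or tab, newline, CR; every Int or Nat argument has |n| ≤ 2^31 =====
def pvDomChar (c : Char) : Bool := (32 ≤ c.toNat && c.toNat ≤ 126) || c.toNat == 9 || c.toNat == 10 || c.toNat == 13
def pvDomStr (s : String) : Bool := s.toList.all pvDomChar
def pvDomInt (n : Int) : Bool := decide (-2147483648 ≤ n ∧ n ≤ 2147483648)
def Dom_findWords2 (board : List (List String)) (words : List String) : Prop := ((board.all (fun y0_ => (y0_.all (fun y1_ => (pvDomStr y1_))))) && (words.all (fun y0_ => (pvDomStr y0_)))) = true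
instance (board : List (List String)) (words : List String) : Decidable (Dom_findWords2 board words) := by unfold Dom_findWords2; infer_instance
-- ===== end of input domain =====

-- B replaces A's linked TrieNode class by a flat prefix→next-chars dict plus a word set,
-- and makes the DFS purely functional (visited/result passed as values); same return
-- value, no speed claim. Neither Python mutates its arguments.
-- The Python returns list(result) of a set: per the type convention the ports return the
-- set's elements in first-insertion order; outputs are compared as sets.

-- ===== PORT A =====
-- TrieNode: children dict + is_end flag; children keyed by 1-char strings.
-- (mutual pair instead of a nested inductive; the dict ops on PvKids are hand ports of
-- the Python dict: first-match lookup, overwrite keeps position, new keys append — exact.)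
mutual
inductive PvTrie : Type where
  | mk : Bool → PvKids → PvTrie
inductive PvKids : Type where
  | nil : PvKids
  | cons : String → PvTrie → PvKids → PvKids
end

def PvTrie.isEnd : PvTrie → Bool | .mk e _ => e
def PvTrie.kids : PvTrie → PvKids | .mk _ k => k

def pvKidsGet? : PvKids → String → Option PvTrie
  | .nil, _ => none
  | .cons k t r, key => if k == key then some t else pvKidsGet? r key

def pvKidsSet : PvKids → String → PvTrie → PvKids
  | .nil, key, v => .cons key v .nil
  | .cons k t r, key, v => if k == key then .cons k v r else .cons k t (pvKidsSet r key v)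

-- TrieNode.addWord (functional path-copying version of the pointer walk)
def pvAddWord : PvTrie → List Char → PvTrie
  | .mk e kids, [] => .mk true kids
  | .mk e kids, c :: cs =>
    let key := String.ofList [c]
    let child := (pvKidsGet? kids key).getD (.mk false .nil)
    .mk e (pvKidsSet kids key (pvAddWord child cs))

def pvBuildTrie (words : List String) : PvTrie :=
  words.foldl (fun t w => pvAddWord t w.toList) (.mk false .nil)

-- backtrack; fuel is only a totality guard (initial fuel rows*cols+1 is never exhausted:
-- each successful descent adds a fresh in-range cell to visit).
def pvBacktrackA (board : List (List String)) (nr nc : Int) (fuel : Nat) (r c : Int)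
    (node : PvTrie) (word : String) (visit : PySem.Set (Int × Int))
    (result : PySem.Set String) : PySem.Set String :=
  match fuel with
  | 0 => result
  | fuel + 1 =>
    if r < 0 ∨ c < 0 ∨ r = nr ∨ c = nc then result else
    match (PySem.List.pyGet? board r).bind (fun row => PySem.List.pyGet? row c) with
    | none => result   -- board[row][column] raises IndexError here: outside Pre_
    | some cell =>
      match pvKidsGet? node.kids cell with
      | none => result
      | some child =>
        if (r, c) ∈ visit then result else
        let visit' := PySem.Set.add visit (r, c)
        let word' := word ++ cell
        let result1 := if child.isEnd then PySem.Set.add result word' else result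
        let result2 := pvBacktrackA board nr nc fuel (r+1) c child word' visit' result1
        let result3 := pvBacktrackA board nr nc fuel (r-1) c child word' visit' result2
        let result4 := pvBacktrackA board nr nc fuel r (c+1) child word' visit' result3
        pvBacktrackA board nr nc fuel r (c-1) child word' visit' result4

def findWords2 (board : List (List String)) (words : List String) : List String :=
  let root := pvBuildTrie words
  let nr : Int := (board.length : Int)
  let nc : Int := (((PySem.List.pyGet? board 0).getD []).length : Int)  -- len(board[0]); board = [] raises IndexError: outside Pre_
  let fuel := board.length * ((PySem.List.pyGet? board 0).getD []).length + 1
  (PySem.List.pyRange 0 nr 1).foldl (fun res r =>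
    (PySem.List.pyRange 0 nc 1).foldl (fun res c =>
      pvBacktrackA board nr nc fuel r c root "" PySem.Set.empty res) res) PySem.Set.empty

-- ===== PORT B =====
-- nexts: dict mapping each proper prefix p of a word to the set of 1-char strings ch
-- with p+ch still a prefix; built with setdefault(...).add (ported as Dict.modify).
def pvBuildNexts (words : List String) : PySem.Dict String (PySem.Set String) :=
  words.foldl (fun d w =>
    (w.toList.foldl (fun (st : String × PySem.Dict String (PySem.Set String)) ch =>
        (st.1 ++ String.ofList [ch],
         PySem.Dict.modify st.2 st.1 PySem.Set.empty (fun s => PySem.Set.add s (String.ofList [ch]))))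
      ("", d)).2)
    PySem.Dict.empty

def pvDfsB (board : List (List String)) (nr nc : Int) (wordset : PySem.Set String)
    (nexts : PySem.Dict String (PySem.Set String)) (fuel : Nat) (r c : Int)
    (path : String) (visited : PySem.Set (Int × Int))
    (acc : PySem.Set String) : PySem.Set String :=
  match fuel with
  | 0 => acc
  | fuel + 1 =>
    if r < 0 ∨ c < 0 ∨ r = nr ∨ c = nc then acc else
    match (PySem.List.pyGet? board r).bind (fun row => PySem.List.pyGet? row c) with
    | none => acc   -- board[r][c] raises IndexError here: outside Pre_
    | some cell =>
      if ¬ (PySem.Set.contains (PySem.Dict.getD nexts path PySem.Set.empty) cell = true)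
          ∨ (r, c) ∈ visited then acc else
      let path2 := path ++ cell
      let acc1 := if PySem.Set.contains wordset path2 then PySem.Set.union acc [path2] else acc
      let visited2 := PySem.Set.union visited [(r, c)]
      [((1:Int),(0:Int)), (-1,0), (0,1), (0,-1)].foldl
        (fun a d => pvDfsB board nr nc wordset nexts fuel (r + d.1) (c + d.2) path2 visited2 a) acc1

def findWords2_alt (board : List (List String)) (words : List String) : List String :=
  let wordset := PySem.Set.ofList words
  let nexts := pvBuildNexts words
  let nr : Int := (board.length : Int)
  let nc : Int := (((PySem.List.pyGet? board 0).getD []).length : Int)  -- len(board[0]); board = [] raises IndexError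
  let fuel := board.length * ((PySem.List.pyGet? board 0).getD []).length + 1
  (PySem.List.pyRange 0 nr 1).foldl (fun a r =>
    (PySem.List.pyRange 0 nc 1).foldl (fun a c =>
      pvDfsB board nr nc wordset nexts fuel r c "" PySem.Set.empty a) a) PySem.Set.empty

-- ===== PRECONDITION & SPEC =====
-- Pre_ excludes exactly the inputs where the Python A raises IndexError: the empty board
-- (len(board[0])) and boards with a row shorter than row 0 (board[row][column]).
def Pre_findWords2 (board : List (List String)) (words : List String) : Prop :=
  board ≠ [] ∧ ∀ row ∈ board, (board.headD []).length ≤ row.length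
instance (board : List (List String)) (words : List String) : Decidable (Pre_findWords2 board words) := by unfold Pre_findWords2; infer_instance

def pvWitness_findWords2 : List (List String) × List String := ([["a"]], ["a"])

def Spec_findWords2 (board : List (List String)) (words : List String) (out : List String) : Prop := out = findWords2_alt board words
instance (board : List (List String)) (words : List String) (out : List String) : Decidable (Spec_findWords2 board words out) := by unfold Spec_findWords2; infer_instance

-- ===== CLAIM (what is proved, stated in full; the proofs are below) =====
def Claim_equal_findWords2 : Prop := ∀ (board : List (List String)) (words : List String), Dom_findWords2 board words → Pre_findWords2 board words → Spec_findWords2 board words (findWords2 board words)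

-- ===== LEMMAS AND PROOFS =====

-- the trie node reached from t by descending one character per step
def pvNodeAt : PvTrie → List Char → Option PvTrie
  | t, [] => some t
  | t, c :: cs =>
    match pvKidsGet? t.kids (String.ofList [c]) with
    | none => none
    | some ch => pvNodeAt ch cs

def pvEndAt (t : PvTrie) (p : List Char) : Bool :=
  match pvNodeAt t p with
  | some n => n.isEnd
  | none => false

def pvHasKid (t : PvTrie) (p : List Char) (k : String) : Bool :=
  match pvNodeAt t p with
  | some n => (pvKidsGet? n.kids k).isSome
  | none => false

@[simp] theorem pvKids_mk (e : Bool) (k : PvKids) : (PvTrie.mk e k).kids = k := rfl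
@[simp] theorem pvIsEnd_mk (e : Bool) (k : PvKids) : (PvTrie.mk e k).isEnd = e := rfl

theorem pvOfList_single_inj {c d : Char} (h : String.ofList [c] = String.ofList [d]) : c = d := by
  have := congrArg String.toList h; simpa using this

theorem pvKidsGet?_set : ∀ (ks : PvKids) (key k : String) (v : PvTrie),
    pvKidsGet? (pvKidsSet ks key v) k = if k = key then some v else pvKidsGet? ks k
  | .nil, key, k, v => by
    by_cases h : k = key
    · subst h; simp [pvKidsSet, pvKidsGet?]
    · have h' : ¬ key = k := fun hh => h hh.symm
      simp [pvKidsSet, pvKidsGet?, beq_iff_eq, h, h']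
  | .cons k' t r, key, k, v => by
    have ih := pvKidsGet?_set r key k v
    by_cases h : k' = key
    · subst h
      by_cases h2 : k = k'
      · subst h2; simp [pvKidsSet, pvKidsGet?]
      · have h2' : ¬ k' = k := fun hh => h2 hh.symm
        simp [pvKidsSet, pvKidsGet?, beq_iff_eq, h2, h2']
    · by_cases h2 : k = k'
      · subst h2
        have hne : ¬ k = key := h
        simp [pvKidsSet, pvKidsGet?, beq_iff_eq, h]
      · have h2' : ¬ k' = k := fun hh => h2 hh.symm
        simp [pvKidsSet, pvKidsGet?, beq_iff_eq, h, h2', ih]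

theorem pvNodeAt_cons (t : PvTrie) (c : Char) (cs : List Char) :
    pvNodeAt t (c :: cs) = match pvKidsGet? t.kids (String.ofList [c]) with
      | none => none
      | some ch => pvNodeAt ch cs := rfl

theorem pvNodeAt_append (t : PvTrie) (p q : List Char) :
    pvNodeAt t (p ++ q) = (pvNodeAt t p).bind (fun n => pvNodeAt n q) := by
  induction p generalizing t with
  | nil => simp [pvNodeAt]
  | cons c cs ih =>
    rw [List.cons_append, pvNodeAt_cons, pvNodeAt_cons]
    cases pvKidsGet? t.kids (String.ofList [c]) with
    | none => simp
    | some ch => simp [ih]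

theorem pvEndAt_nil (t : PvTrie) : pvEndAt t [] = t.isEnd := rfl

theorem pvEndAt_cons_none {t : PvTrie} {c : Char} (cs : List Char)
    (h : pvKidsGet? t.kids (String.ofList [c]) = none) : pvEndAt t (c :: cs) = false := by
  simp [pvEndAt, pvNodeAt_cons, h]

theorem pvEndAt_cons_some {t ch : PvTrie} {c : Char} (cs : List Char)
    (h : pvKidsGet? t.kids (String.ofList [c]) = some ch) : pvEndAt t (c :: cs) = pvEndAt ch cs := by
  simp [pvEndAt, pvNodeAt_cons, h]

theorem pvHasKid_nil (t : PvTrie) (k : String) :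
    pvHasKid t [] k = (pvKidsGet? t.kids k).isSome := rfl

theorem pvHasKid_cons_none {t : PvTrie} {c : Char} (cs : List Char) (k : String)
    (h : pvKidsGet? t.kids (String.ofList [c]) = none) : pvHasKid t (c :: cs) k = false := by
  simp [pvHasKid, pvNodeAt_cons, h]

theorem pvHasKid_cons_some {t ch : PvTrie} {c : Char} (cs : List Char) (k : String)
    (h : pvKidsGet? t.kids (String.ofList [c]) = some ch) :
    pvHasKid t (c :: cs) k = pvHasKid ch cs k := by
  simp [pvHasKid, pvNodeAt_cons, h]

theorem pvEndAt_empty (p : List Char) : pvEndAt (.mk false .nil) p = false := by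
  cases p with
  | nil => rfl
  | cons c cs => exact pvEndAt_cons_none cs rfl

theorem pvHasKid_empty (p : List Char) (k : String) : pvHasKid (.mk false .nil) p k = false := by
  cases p with
  | nil => simp [pvHasKid_nil, pvKidsGet?]
  | cons c cs => exact pvHasKid_cons_none cs k rfl

theorem pvEndAt_addWord (p : List Char) : ∀ (t : PvTrie) (w : List Char),
    pvEndAt (pvAddWord t w) p = (pvEndAt t p || decide (p = w)) := by
  induction p with
  | nil =>
    intro t w
    cases t with | mk e kids => cases w <;> simp [pvAddWord, pvEndAt_nil]
  | cons c' p' ih =>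
    intro t w
    cases t with | mk e kids =>
    cases w with
    | nil =>
      rw [show pvAddWord (.mk e kids) [] = .mk true kids from rfl]
      cases hg : pvKidsGet? kids (String.ofList [c']) with
      | none =>
        rw [pvEndAt_cons_none (t := .mk true kids) p' hg,
            pvEndAt_cons_none (t := .mk e kids) p' hg]
        simp
      | some ch =>
        rw [pvEndAt_cons_some (t := .mk true kids) p' hg,
            pvEndAt_cons_some (t := .mk e kids) p' hg]
        simp
    | cons c cs =>
      rw [show pvAddWord (.mk e kids) (c :: cs)
            = .mk e (pvKidsSet kids (String.ofList [c])
                (pvAddWord ((pvKidsGet? kids (String.ofList [c])).getD (.mk false .nil)) cs)) from rfl]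
      by_cases hc : c' = c
      · subst hc
        have hnew : pvKidsGet? (pvKidsSet kids (String.ofList [c'])
              (pvAddWord ((pvKidsGet? kids (String.ofList [c'])).getD (.mk false .nil)) cs)) (String.ofList [c'])
            = some (pvAddWord ((pvKidsGet? kids (String.ofList [c'])).getD (.mk false .nil)) cs) := by
          rw [pvKidsGet?_set, if_pos rfl]
        rw [pvEndAt_cons_some (t := .mk e _) p' hnew, ih]
        cases hg : pvKidsGet? kids (String.ofList [c']) with
        | none =>
          rw [pvEndAt_cons_none (t := .mk e kids) p' hg]
          simp [pvEndAt_empty]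
        | some ch =>
          rw [pvEndAt_cons_some (t := .mk e kids) p' hg]
          simp
      · have hkne : String.ofList [c'] ≠ String.ofList [c] := fun h => hc (pvOfList_single_inj h)
        have hnew : pvKidsGet? (pvKidsSet kids (String.ofList [c])
              (pvAddWord ((pvKidsGet? kids (String.ofList [c])).getD (.mk false .nil)) cs)) (String.ofList [c'])
            = pvKidsGet? kids (String.ofList [c']) := by
          rw [pvKidsGet?_set, if_neg hkne]
        cases hg : pvKidsGet? kids (String.ofList [c']) with
        | none =>
          rw [pvEndAt_cons_none (t := .mk e _) p' (hnew.trans hg),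
              pvEndAt_cons_none (t := .mk e kids) p' hg]
          simp [hc]
        | some ch =>
          rw [pvEndAt_cons_some (t := .mk e _) p' (hnew.trans hg),
              pvEndAt_cons_some (t := .mk e kids) p' hg]
          simp [hc]

theorem pvHasKid_addWord (p : List Char) : ∀ (t : PvTrie) (w : List Char) (k : String),
    pvHasKid (pvAddWord t w) p k
      = (pvHasKid t p k || decide (∃ c, k = String.ofList [c] ∧ p ++ [c] <+: w)) := by
  induction p with
  | nil =>
    intro t w k
    cases t with | mk e kids =>
    cases w with
    | nil => simp [pvAddWord, pvHasKid_nil]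
    | cons c cs =>
      rw [show pvAddWord (.mk e kids) (c :: cs)
            = .mk e (pvKidsSet kids (String.ofList [c])
                (pvAddWord ((pvKidsGet? kids (String.ofList [c])).getD (.mk false .nil)) cs)) from rfl,
          pvHasKid_nil, pvHasKid_nil, pvKids_mk, pvKids_mk, pvKidsGet?_set]
      have hiff : (∃ c0, k = String.ofList [c0] ∧ [] ++ [c0] <+: c :: cs) ↔ k = String.ofList [c] := by
        constructor
        · rintro ⟨c0, rfl, hp⟩
          rw [List.nil_append, List.cons_prefix_cons] at hp
          rw [hp.1]
        · rintro rfl; exact ⟨c, rfl, by simp [List.cons_prefix_cons]⟩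
      by_cases hk : k = String.ofList [c]
      · rw [if_pos hk]; simp [hk]
      · rw [if_neg hk]; simp [hk]
  | cons c' p' ih =>
    intro t w k
    cases t with | mk e kids =>
    cases w with
    | nil =>
      rw [show pvAddWord (.mk e kids) [] = .mk true kids from rfl]
      have hnil : ¬ ∃ c0, k = String.ofList [c0] ∧ (c' :: p') ++ [c0] <+: ([] : List Char) := by
        rintro ⟨c0, _, hp⟩
        have := hp.length_le
        simp at this
      cases hg : pvKidsGet? kids (String.ofList [c']) with
      | none =>
        rw [pvHasKid_cons_none (t := .mk true kids) p' k hg,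
            pvHasKid_cons_none (t := .mk e kids) p' k hg]
        simp
      | some ch =>
        rw [pvHasKid_cons_some (t := .mk true kids) p' k hg,
            pvHasKid_cons_some (t := .mk e kids) p' k hg]
        simp
    | cons c cs =>
      rw [show pvAddWord (.mk e kids) (c :: cs)
            = .mk e (pvKidsSet kids (String.ofList [c])
                (pvAddWord ((pvKidsGet? kids (String.ofList [c])).getD (.mk false .nil)) cs)) from rfl]
      by_cases hc : c' = c
      · subst hc
        have hiff : (∃ c0, k = String.ofList [c0] ∧ (c' :: p') ++ [c0] <+: c' :: cs)
            ↔ (∃ c0, k = String.ofList [c0] ∧ p' ++ [c0] <+: cs) := by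
          constructor
          · rintro ⟨c0, rfl, hp⟩
            rw [List.cons_append, List.cons_prefix_cons] at hp
            exact ⟨c0, rfl, hp.2⟩
          · rintro ⟨c0, rfl, hp⟩
            exact ⟨c0, rfl, by simpa [List.cons_prefix_cons] using hp⟩
        have hnew : pvKidsGet? (pvKidsSet kids (String.ofList [c'])
              (pvAddWord ((pvKidsGet? kids (String.ofList [c'])).getD (.mk false .nil)) cs)) (String.ofList [c'])
            = some (pvAddWord ((pvKidsGet? kids (String.ofList [c'])).getD (.mk false .nil)) cs) := by
          rw [pvKidsGet?_set, if_pos rfl]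
        rw [pvHasKid_cons_some (t := .mk e _) p' k hnew, ih]
        cases hg : pvKidsGet? kids (String.ofList [c']) with
        | none =>
          rw [pvHasKid_cons_none (t := .mk e kids) p' k hg]
          simp only [hiff]
          simp [pvHasKid_empty]
        | some ch =>
          rw [pvHasKid_cons_some (t := .mk e kids) p' k hg]
          simp only [hiff]
          simp
      · have hkne : String.ofList [c'] ≠ String.ofList [c] := fun h => hc (pvOfList_single_inj h)
        have hiff : ¬ ∃ c0, k = String.ofList [c0] ∧ (c' :: p') ++ [c0] <+: c :: cs := by
          rintro ⟨c0, _, hp⟩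
          rw [List.cons_append, List.cons_prefix_cons] at hp
          exact hc hp.1
        have hnew : pvKidsGet? (pvKidsSet kids (String.ofList [c])
              (pvAddWord ((pvKidsGet? kids (String.ofList [c])).getD (.mk false .nil)) cs)) (String.ofList [c'])
            = pvKidsGet? kids (String.ofList [c']) := by
          rw [pvKidsGet?_set, if_neg hkne]
        cases hg : pvKidsGet? kids (String.ofList [c']) with
        | none =>
          rw [pvHasKid_cons_none (t := .mk e _) p' k (hnew.trans hg),
              pvHasKid_cons_none (t := .mk e kids) p' k hg, decide_eq_false hiff]
          simp
        | some ch =>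
          rw [pvHasKid_cons_some (t := .mk e _) p' k (hnew.trans hg),
              pvHasKid_cons_some (t := .mk e kids) p' k hg, decide_eq_false hiff]
          simp

theorem pvBuildTrie_append (ws : List String) (w : String) :
    pvBuildTrie (ws ++ [w]) = pvAddWord (pvBuildTrie ws) w.toList := by
  simp [pvBuildTrie, List.foldl_append]

theorem pvEndAt_build (ws : List String) (p : List Char) :
    pvEndAt (pvBuildTrie ws) p = true ↔ ∃ w ∈ ws, w.toList = p := by
  induction ws using List.reverseRecOn with
  | nil => simp [pvBuildTrie, pvEndAt_empty]
  | append_singleton ws w ih =>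
    rw [pvBuildTrie_append, pvEndAt_addWord]
    simp only [Bool.or_eq_true, decide_eq_true_eq, ih, List.mem_append, List.mem_singleton]
    constructor
    · rintro (⟨w', hw', h⟩ | h)
      · exact ⟨w', Or.inl hw', h⟩
      · exact ⟨w, Or.inr rfl, h.symm⟩
    · rintro ⟨w', (hw' | rfl), h⟩
      · exact Or.inl ⟨w', hw', h⟩
      · exact Or.inr h.symm

theorem pvHasKid_build (ws : List String) (p : List Char) (k : String) :
    pvHasKid (pvBuildTrie ws) p k = true
      ↔ ∃ c, k = String.ofList [c] ∧ ∃ w ∈ ws, p ++ [c] <+: w.toList := by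
  induction ws using List.reverseRecOn with
  | nil => simp [pvBuildTrie, pvHasKid_empty]
  | append_singleton ws w ih =>
    rw [pvBuildTrie_append, pvHasKid_addWord]
    simp only [Bool.or_eq_true, decide_eq_true_eq, ih, List.mem_append, List.mem_singleton]
    constructor
    · rintro (⟨c, hk, w', hw', hp⟩ | ⟨c, hk, hp⟩)
      · exact ⟨c, hk, w', Or.inl hw', hp⟩
      · exact ⟨c, hk, w, Or.inr rfl, hp⟩
    · rintro ⟨c, hk, w', (hw' | rfl), hp⟩
      · exact Or.inl ⟨c, hk, w', hw', hp⟩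
      · exact Or.inr ⟨c, hk, hp⟩

theorem pvToList_single (c : Char) : (String.ofList [c]).toList = [c] := String.toList_ofList

theorem pvToList_append_single (s : String) (c : Char) :
    (s ++ String.ofList [c]).toList = s.toList ++ [c] := by
  rw [String.toList_append, pvToList_single]

theorem pvNexts_inner (cs : List Char) : ∀ (p : String) (d : PySem.Dict String (PySem.Set String)) (q k : String),
    PySem.Set.contains ((cs.foldl (fun (st : String × PySem.Dict String (PySem.Set String)) ch =>
        (st.1 ++ String.ofList [ch],
         PySem.Dict.modify st.2 st.1 PySem.Set.empty (fun s => PySem.Set.add s (String.ofList [ch])))) (p, d)).2.getD q PySem.Set.empty) k = true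
    ↔ PySem.Set.contains (d.getD q PySem.Set.empty) k = true
      ∨ ∃ c, k = String.ofList [c] ∧ p.toList <+: q.toList ∧ q.toList ++ [c] <+: p.toList ++ cs := by
  induction cs with
  | nil =>
    intro p d q k
    simp only [List.foldl_nil, List.append_nil]
    constructor
    · exact Or.inl
    · rintro (h | ⟨c, _, h1, h2⟩)
      · exact h
      · exfalso
        have l1 := h1.length_le
        have l2 := h2.length_le
        rw [List.length_append] at l2
        simp only [List.length_singleton] at l2
        omega
  | cons c cs ih =>
    intro p d q k
    rw [List.foldl_cons]
    dsimp only
    rw [ih, PySem.Dict.getD_modify]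
    by_cases hq : q = p
    · subst hq
      rw [if_pos rfl, pvToList_append_single]
      have hcontains : PySem.Set.contains (PySem.Set.add (d.getD q PySem.Set.empty) (String.ofList [c])) k = true
          ↔ PySem.Set.contains (d.getD q PySem.Set.empty) k = true ∨ k = String.ofList [c] := by
        rw [PySem.Set.contains_iff, PySem.Set.contains_iff]
        exact PySem.Set.mem_add _ _ _
      rw [hcontains]
      constructor
      · rintro ((h | hk) | ⟨c', hk, h1, h2⟩)
        · exact Or.inl h
        · exact Or.inr ⟨c, hk, List.prefix_refl _, ⟨cs, by simp⟩⟩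
        · exfalso
          have l1 := h1.length_le
          rw [List.length_append] at l1
          simp only [List.length_singleton] at l1
          omega
      · rintro (h | ⟨c', hk, _, h2⟩)
        · exact Or.inl (Or.inl h)
        · have h3 : [c'] <+: c :: cs := (List.prefix_append_right_inj q.toList).mp h2
          rw [List.cons_prefix_cons] at h3
          exact Or.inl (Or.inr (h3.1 ▸ hk))
    · rw [if_neg hq, pvToList_append_single]
      constructor
      · rintro (h | ⟨c', hk, h1, h2⟩)
        · exact Or.inl h
        · refine Or.inr ⟨c', hk, (List.prefix_append _ [c]).trans h1, ?_⟩
          rw [List.append_assoc] at h2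
          exact h2
      · rintro (h | ⟨c', hk, h1, h2⟩)
        · exact Or.inl h
        · obtain ⟨s, hs⟩ := h1
          cases s with
          | nil =>
            exfalso; apply hq; apply String.toList_inj.mp; rw [← hs, List.append_nil]
          | cons c'' s' =>
            have h2' : (p.toList ++ c'' :: s') ++ [c'] <+: p.toList ++ c :: cs := by
              rw [hs]; exact h2
            rw [List.append_assoc, List.prefix_append_right_inj, List.cons_append,
                List.cons_prefix_cons] at h2'
            obtain ⟨rfl, hsc2⟩ := h2'
            refine Or.inr ⟨c', hk, ?_, ?_⟩
            · rw [← hs, List.prefix_append_right_inj, List.cons_prefix_cons]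
              exact ⟨rfl, List.nil_prefix⟩
            · rw [List.append_assoc]
              exact hs ▸ h2

theorem pvBuildNexts_append (ws : List String) (w : String) :
    pvBuildNexts (ws ++ [w])
      = (w.toList.foldl (fun (st : String × PySem.Dict String (PySem.Set String)) ch =>
          (st.1 ++ String.ofList [ch],
           PySem.Dict.modify st.2 st.1 PySem.Set.empty (fun s => PySem.Set.add s (String.ofList [ch]))))
          ("", pvBuildNexts ws)).2 := by
  simp [pvBuildNexts, List.foldl_append]

theorem pvNexts_build (ws : List String) (q k : String) :
    PySem.Set.contains ((pvBuildNexts ws).getD q PySem.Set.empty) k = true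
      ↔ ∃ c, k = String.ofList [c] ∧ ∃ w ∈ ws, q.toList ++ [c] <+: w.toList := by
  induction ws using List.reverseRecOn with
  | nil => simp [pvBuildNexts, PySem.Dict.getD_empty, PySem.Set.empty]
  | append_singleton ws w ih =>
    rw [pvBuildNexts_append, pvNexts_inner, ih]
    have hemp : ("" : String).toList = [] := rfl
    simp only [hemp, List.nil_prefix, true_and, List.nil_append, List.mem_append,
      List.mem_singleton]
    constructor
    · rintro (⟨c, hk, w', hw', hp⟩ | ⟨c, hk, hp⟩)
      · exact ⟨c, hk, w', Or.inl hw', hp⟩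
      · exact ⟨c, hk, w, Or.inr rfl, hp⟩
    · rintro ⟨c, hk, w', (hw' | rfl), hp⟩
      · exact Or.inl ⟨c, hk, w', hw', hp⟩
      · exact Or.inr ⟨c, hk, hp⟩

theorem pvWordset (ws : List String) (s : String) :
    PySem.Set.contains (PySem.Set.ofList ws) s = true ↔ ∃ w ∈ ws, w.toList = s.toList := by
  rw [PySem.Set.contains_iff, PySem.Set.mem_ofList]
  constructor
  · intro h; exact ⟨s, h, rfl⟩
  · rintro ⟨w, hw, h⟩; exact (String.toList_inj.mp h) ▸ hw

theorem pvUnion_single {α : Type} [BEq α] (s : PySem.Set α) (x : α) :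
    PySem.Set.union s [x] = PySem.Set.add s x := rfl

theorem pvDfs_eq (board : List (List String)) (nr nc : Int) (ws : List String) :
    ∀ (fuel : Nat) (r c : Int) (path : String) (node : PvTrie)
      (visit : PySem.Set (Int × Int)) (acc : PySem.Set String),
      pvNodeAt (pvBuildTrie ws) path.toList = some node →
      pvBacktrackA board nr nc fuel r c node path visit acc
        = pvDfsB board nr nc (PySem.Set.ofList ws) (pvBuildNexts ws) fuel r c path visit acc := by
  intro fuel
  induction fuel with
  | zero => intro r c path node visit acc _; rfl
  | succ f ih =>
    intro r c path node visit acc hnode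
    by_cases hg : r < 0 ∨ c < 0 ∨ r = nr ∨ c = nc
    · simp only [pvBacktrackA, pvDfsB, if_pos hg]
    · cases hcell : (PySem.List.pyGet? board r).bind (fun row => PySem.List.pyGet? row c) with
      | none =>
        simp only [pvBacktrackA, pvDfsB, hcell, if_neg hg]
      | some cell =>
        have hkidiff : (pvKidsGet? node.kids cell).isSome = pvHasKid (pvBuildTrie ws) path.toList cell := by
          simp [pvHasKid, hnode]
        cases hk : pvKidsGet? node.kids cell with
        | none =>
          have hno : ¬ (PySem.Set.contains (PySem.Dict.getD (pvBuildNexts ws) path PySem.Set.empty) cell = true) := by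
            intro hx
            obtain ⟨c0, hkc, w', hw', hp⟩ := (pvNexts_build ws path cell).mp hx
            have h1 : pvHasKid (pvBuildTrie ws) path.toList cell = true :=
              (pvHasKid_build ws path.toList cell).mpr ⟨c0, hkc, w', hw', hp⟩
            rw [← hkidiff, hk] at h1
            simp at h1
          simp only [pvBacktrackA, pvDfsB, hcell, hk, if_neg hg, if_pos (Or.inl hno)]
        | some child =>
          have hs : pvHasKid (pvBuildTrie ws) path.toList cell = true := by
            rw [← hkidiff, hk]; rfl
          obtain ⟨c0, hc0, hex⟩ := (pvHasKid_build ws path.toList cell).mp hs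
          have hcont : PySem.Set.contains (PySem.Dict.getD (pvBuildNexts ws) path PySem.Set.empty) cell = true :=
            (pvNexts_build ws path cell).mpr ⟨c0, hc0, hex⟩
          by_cases hv : (r, c) ∈ visit
          · simp only [pvBacktrackA, pvDfsB, hcell, hk, if_neg hg, if_pos hv,
              if_pos (Or.inr hv)]
          · have hguard : ¬ (¬ (PySem.Set.contains (PySem.Dict.getD (pvBuildNexts ws) path PySem.Set.empty) cell = true)
                ∨ (r, c) ∈ visit) := fun h => h.elim (fun hn => hn hcont) hv
            have hpath2 : (path ++ cell).toList = path.toList ++ [c0] := by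
              rw [hc0, pvToList_append_single]
            have hchild : pvNodeAt (pvBuildTrie ws) (path ++ cell).toList = some child := by
              rw [hpath2, pvNodeAt_append, hnode, Option.bind_some, pvNodeAt_cons, ← hc0, hk]
              rfl
            have hend : child.isEnd = PySem.Set.contains (PySem.Set.ofList ws) (path ++ cell) := by
              have h1 : pvEndAt (pvBuildTrie ws) (path ++ cell).toList = child.isEnd := by
                unfold pvEndAt; rw [hchild]
              have h2 := pvEndAt_build ws (path ++ cell).toList
              rw [h1] at h2
              have h3 := pvWordset ws (path ++ cell)
              cases hE : child.isEnd <;> cases hC : PySem.Set.contains (PySem.Set.ofList ws) (path ++ cell)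
              · rfl
              · rw [hE] at h2; rw [hC] at h3
                exact absurd (h2.mpr (h3.mp rfl)) (by simp)
              · rw [hE] at h2; rw [hC] at h3
                exact absurd (h3.mpr (h2.mp rfl)) (by simp)
              · rfl
            simp only [pvBacktrackA, pvDfsB, hcell, hk, if_neg hg, if_neg hv, if_neg hguard,
              List.foldl_cons, List.foldl_nil]
            rw [hend]
            simp only [pvUnion_single]
            rw [show r + (0 : Int) = r from by ring, show c + (0 : Int) = c from by ring,
                show r + (-1 : Int) = r - 1 from by ring, show c + (-1 : Int) = c - 1 from by ring]
            rw [ih (r+1) c (path ++ cell) child _ _ hchild,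
                ih (r-1) c (path ++ cell) child _ _ hchild,
                ih r (c+1) (path ++ cell) child _ _ hchild,
                ih r (c-1) (path ++ cell) child _ _ hchild]

-- ===== VERDICT (by name: the statement is the Claim_ definition above) =====
theorem findWords2_spec : Claim_equal_findWords2 := by
  intro board words _dom _pre
  unfold Spec_findWords2
  show findWords2 board words = findWords2_alt board words
  unfold findWords2 findWords2_alt
  apply PySem.List.foldl_congr_mem
  intro acc r _
  apply PySem.List.foldl_congr_mem
  intro acc2 c _
  exact pvDfs_eq board _ _ words _ r c "" (pvBuildTrie words) PySem.Set.empty acc2 rfl
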